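-- pv_equiv track=rewrite | github.com/juanlucasantoliquido/Stacky | Stacky pipeline/linters/lint_scope.py | _is_in_scope
-- ===== SOURCE A (Python) =====
-- def _is_in_scope(file_path: str, scope_paths: set[str], scope_filenames: set[str]) -> bool:
--     """
--     Match con prioridad:
--       1. Path completo en scope_paths (match exacto o sufijo).
--       2. Si NO hay path completo en scope_paths que use ese mismo basename,
--          entonces aceptar match por basename solo (cuando TAREAS menciona
--          "Foo.cs" sin path).
--
--     Esto evita falso negativo cuando TAREAS dice `RSFac/Cliente.cs` y el diff
--     toca `RSDalc/Cliente.cs` — ambos con basename `Cliente.cs`, pero solo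
--     el primero está autorizado.
--     """
--     normalized = file_path.replace("\\", "/")
--     basename = normalized.rsplit("/", 1)[-1]
--     scope_paths_normalized = {sp.replace("\\", "/") for sp in scope_paths}
--
--     # 1. Match por path completo
--     for sp_norm in scope_paths_normalized:
--         if normalized == sp_norm or normalized.endswith("/" + sp_norm.lstrip("/")):
--             return True
--
--     # 2. Match por basename — solo si el basename no aparece en scope_paths
--     #    con un path distinto. Si aparece, el match por basename es ambiguo y
--     #    debe exigirse path completo.
--     basename_in_scope_paths = any(
--         sp.rsplit("/", 1)[-1] == basename for sp in scope_paths_normalized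
--     )
--     if basename_in_scope_paths:
--         return False  # exigir path completo
--
--     if basename in scope_filenames:
--         return True
--
--     return False
-- ===== SOURCE B (Python) =====
-- def _is_in_scope(file_path: str, scope_paths: set[str], scope_filenames: set[str]) -> bool:
--     normalized = file_path.replace("\\", "/")
--     basename = normalized.rsplit("/", 1)[-1]
--     exact = {sp.replace("\\", "/") for sp in scope_paths}
--     stripped = {sp.lstrip("/") for sp in exact}
--     if normalized in exact:
--         return True
--     suffixes = {normalized[i + 1:] for i in range(len(normalized)) if normalized[i] == "/"}
--     if suffixes & stripped:
--         return True
--     if basename in {sp.rsplit("/", 1)[-1] for sp in exact}: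
--         return False
--     return basename in scope_filenames
-- ===== Notes on version B (the rewrite author's own statement) =====
-- stated objective: idiomatic
-- what changed: Replaces A's per-scope-path loop testing equality/endswith with set lookups: an exact-match set, a lstripped set intersected with the component-suffix set of the single file path, and a precomputed basename set for the ambiguity guard.
import Mathlib
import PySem

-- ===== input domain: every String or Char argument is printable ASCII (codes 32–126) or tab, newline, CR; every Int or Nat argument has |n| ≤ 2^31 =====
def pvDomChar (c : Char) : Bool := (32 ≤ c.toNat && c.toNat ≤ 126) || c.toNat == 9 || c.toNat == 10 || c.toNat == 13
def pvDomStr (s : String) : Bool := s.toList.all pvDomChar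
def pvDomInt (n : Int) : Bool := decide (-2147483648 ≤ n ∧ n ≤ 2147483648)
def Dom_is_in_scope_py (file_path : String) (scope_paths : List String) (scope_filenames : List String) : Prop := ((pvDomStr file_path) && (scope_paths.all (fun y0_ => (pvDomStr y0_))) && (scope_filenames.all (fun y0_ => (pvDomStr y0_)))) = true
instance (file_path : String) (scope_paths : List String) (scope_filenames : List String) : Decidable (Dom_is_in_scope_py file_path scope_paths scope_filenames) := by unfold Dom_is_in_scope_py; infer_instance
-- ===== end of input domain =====

-- B replaces A's per-scope-path scan of the first loop by set membership: an exact-match set, a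
-- lstripped set, and the component-suffix set of the single file path (idiomatic; same cost here).

-- ===== PORT A =====
-- hand port of s.rsplit("/", 1)[-1]: the segment after the LAST '/' (the whole string if no '/');
-- exact: the accumulator is reset at every '/' and collects the characters after it.
def pvBasename (cs : List Char) : List Char :=
  cs.foldl (fun acc c => if c = '/' then [] else acc ++ [c]) []

def is_in_scope_py (file_path : String) (scope_paths : List String) (scope_filenames : List String) : Bool :=
  let normalized := PySem.Chars.replace file_path.toList ['\\'] ['/']
  let basename := pvBasename normalized
  let scope_paths_normalized : PySem.Set (List Char) :=
    PySem.Set.ofList (scope_paths.map (fun sp => PySem.Chars.replace sp.toList ['\\'] ['/']))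
  -- first loop with early return = any; sp.lstrip("/") ported by hand as dropWhile (= '/') (exact:
  -- the chars argument is the single character '/')
  if scope_paths_normalized.any (fun sp_norm =>
      normalized == sp_norm ||
      PySem.Chars.endswith normalized ('/' :: sp_norm.dropWhile (fun c => c == '/'))) then
    true
  else if scope_paths_normalized.any (fun sp => pvBasename sp == basename) then
    false
  else if scope_filenames.any (fun f => f.toList == basename) then
    true
  else
    false

-- ===== PORT B =====
-- the set comprehension over range(len(normalized)); normalized[i+1:] with i+1 ≥ 0 is drop (i+1)
def pvSuffixes (cs : List Char) : PySem.Set (List Char) :=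
  PySem.Set.ofList ((List.range cs.length).filterMap
    (fun i => if cs[i]? == some '/' then some (cs.drop (i + 1)) else none))

def is_in_scope_py_alt (file_path : String) (scope_paths : List String) (scope_filenames : List String) : Bool :=
  let normalized := PySem.Chars.replace file_path.toList ['\\'] ['/']
  let basename := pvBasename normalized
  let exact : PySem.Set (List Char) :=
    PySem.Set.ofList (scope_paths.map (fun sp => PySem.Chars.replace sp.toList ['\\'] ['/']))
  let stripped : PySem.Set (List Char) :=
    PySem.Set.ofList (exact.map (fun sp => sp.dropWhile (fun c => c == '/')))
  if PySem.Set.contains exact normalized then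
    true
  else if !(PySem.Set.inter (pvSuffixes normalized) stripped).isEmpty then
    true
  else if PySem.Set.contains (PySem.Set.ofList (exact.map pvBasename)) basename then
    false
  else if scope_filenames.any (fun f => f.toList == basename) then
    true
  else
    false

-- ===== PRECONDITION & SPEC =====
def Spec_is_in_scope_py (file_path : String) (scope_paths : List String) (scope_filenames : List String) (out : Bool) : Prop := out = is_in_scope_py_alt file_path scope_paths scope_filenames
instance (file_path : String) (scope_paths : List String) (scope_filenames : List String) (out : Bool) : Decidable (Spec_is_in_scope_py file_path scope_paths scope_filenames out) := by unfold Spec_is_in_scope_py; infer_instance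

-- ===== CLAIM (what is proved, stated in full; the proofs are below) =====
def Claim_equal_is_in_scope_py : Prop := ∀ (file_path : String) (scope_paths : List String) (scope_filenames : List String), Dom_is_in_scope_py file_path scope_paths scope_filenames → Spec_is_in_scope_py file_path scope_paths scope_filenames (is_in_scope_py file_path scope_paths scope_filenames)

-- ===== LEMMAS AND PROOFS =====

-- '/'-headed suffixes of cs are exactly the component suffixes cs.drop (i+1) at positions i with cs[i] = '/'
lemma slash_suffix_iff (cs t : List Char) :
    ('/' :: t) <:+ cs ↔ ∃ i, cs[i]? = some '/' ∧ cs.drop (i + 1) = t := by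
  constructor
  · intro h
    have hlen : t.length + 1 ≤ cs.length := by
      have := h.length_le; simpa using this
    set i := cs.length - (t.length + 1) with hi
    have hdrop : cs.drop i = '/' :: t := by
      have := List.suffix_iff_eq_drop.mp h
      simpa [hi] using this.symm
    have hlt : i < cs.length := by omega
    rw [List.drop_eq_getElem_cons hlt] at hdrop
    injection hdrop with h1 h2
    exact ⟨i, by simp [List.getElem?_eq_getElem hlt, h1], h2⟩
  · rintro ⟨i, hget, hdrop⟩
    have hlt : i < cs.length := (List.getElem?_eq_some_iff.mp hget).1
    have hc : cs[i] = '/' := by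
      rw [List.getElem?_eq_getElem hlt] at hget
      simpa using hget
    have : cs.drop i = '/' :: t := by
      rw [List.drop_eq_getElem_cons hlt, hc, hdrop]
    rw [← this]
    exact List.drop_suffix i cs

lemma mem_pvSuffixes (cs t : List Char) :
    t ∈ pvSuffixes cs ↔ ('/' :: t) <:+ cs := by
  rw [slash_suffix_iff]
  unfold pvSuffixes
  rw [PySem.Set.mem_ofList, List.mem_filterMap]
  constructor
  · rintro ⟨i, _, hf⟩
    by_cases h : cs[i]? == some '/'
    · exact ⟨i, by simpa using h, by simpa [h] using hf⟩
    · simp [h] at hf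
  · rintro ⟨i, hget, hdrop⟩
    have hlt : i < cs.length := (List.getElem?_eq_some_iff.mp hget).1
    exact ⟨i, List.mem_range.mpr hlt, by simp [hget, hdrop]⟩

-- B's "suffixes & stripped" is nonempty iff some stripped scope path is a '/'-headed suffix
lemma inter_nonempty_iff (cs : List Char) (S : List (List Char)) :
    (!(PySem.Set.inter (pvSuffixes cs) (PySem.Set.ofList (S.map (fun sp => sp.dropWhile (fun c => c == '/'))))).isEmpty) = true
      ↔ ∃ sp ∈ S, ('/' :: sp.dropWhile (fun c => c == '/')) <:+ cs := by
  rw [Bool.not_eq_eq_eq_not, Bool.not_true, List.isEmpty_eq_false_iff_exists_mem]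
  constructor
  · rintro ⟨x, hx⟩
    rw [PySem.Set.inter] at hx
    obtain ⟨hs, ht⟩ := List.mem_filter.mp hx
    have hsuf := (mem_pvSuffixes _ _).mp hs
    have : x ∈ (S.map (fun sp => sp.dropWhile (fun c => c == '/'))) := by
      have : x ∈ PySem.Set.ofList (S.map (fun sp => sp.dropWhile (fun c => c == '/'))) := by
        simpa [PySem.Set.contains, List.elem_iff] using ht
      simpa [PySem.Set.mem_ofList] using this
    obtain ⟨sp, hsp, rfl⟩ := List.mem_map.mp this
    exact ⟨sp, hsp, hsuf⟩
  · rintro ⟨sp, hsp, hsuf⟩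
    refine ⟨sp.dropWhile (fun c => c == '/'), ?_⟩
    rw [PySem.Set.inter]
    refine List.mem_filter.mpr ⟨(mem_pvSuffixes _ _).mpr hsuf, ?_⟩
    simp only [PySem.Set.contains, List.elem_eq_contains.symm, List.elem_iff]
    rw [PySem.Set.mem_ofList]
    exact List.mem_map.mpr ⟨sp, hsp, rfl⟩

-- three paired conditions of the two if-chains
lemma cond1_eq (cs : List Char) (S : List (List Char)) :
    (PySem.Set.ofList S).any (fun sp => cs == sp || PySem.Chars.endswith cs ('/' :: sp.dropWhile (fun c => c == '/')))
      = (PySem.Set.contains (PySem.Set.ofList S) cs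
         || !(PySem.Set.inter (pvSuffixes cs) (PySem.Set.ofList ((PySem.Set.ofList S).map (fun sp => sp.dropWhile (fun c => c == '/'))))).isEmpty) := by
  rw [Bool.eq_iff_iff, Bool.or_eq_true, inter_nonempty_iff]
  simp only [List.any_eq_true, Bool.or_eq_true, beq_iff_eq, PySem.Chars.endswith_iff,
    PySem.Set.contains, List.elem_eq_contains.symm, List.elem_iff, PySem.Set.mem_ofList]
  constructor
  · rintro ⟨sp, hsp, h | h⟩
    · exact Or.inl (h ▸ hsp)
    · exact Or.inr ⟨sp, hsp, h⟩
  · rintro (h | ⟨sp, hsp, h⟩)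
    · exact ⟨cs, h, Or.inl rfl⟩
    · exact ⟨sp, hsp, Or.inr h⟩

lemma cond2_eq (b : List Char) (S : List (List Char)) :
    (PySem.Set.ofList S).any (fun sp => pvBasename sp == b)
      = PySem.Set.contains (PySem.Set.ofList ((PySem.Set.ofList S).map pvBasename)) b := by
  rw [Bool.eq_iff_iff]
  simp only [List.any_eq_true, beq_iff_eq, PySem.Set.contains, List.elem_eq_contains.symm,
    List.elem_iff, PySem.Set.mem_ofList, List.mem_map]

-- the two if-chains agree once the paired conditions do
lemma pvChain (e s c2 c3 : Bool) :
    (if (e || s) then true else if c2 then false else if c3 then true else false)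
      = (if e then true else if s then true else if c2 then false else if c3 then true else false) := by
  cases e <;> cases s <;> simp

-- ===== VERDICT (by name: the statement is the Claim_ definition above) =====
theorem is_in_scope_py_spec : Claim_equal_is_in_scope_py := by
  intro file_path scope_paths scope_filenames _
  unfold Spec_is_in_scope_py
  simp only [is_in_scope_py, is_in_scope_py_alt]
  rw [cond1_eq, cond2_eq]
  exact pvChain _ _ _ _
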